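-- pv_equiv track=rewrite | github.com/sarpsahinalp/accup | recipePreprocessing.py | classify_diet
-- ===== SOURCE A (Python) =====
-- def classify_diet(products):
--     meat_keywords = ["beef", "pork", "chicken", "lamb", "veal", "venison", "duck", "turkey",
--                      "bacon", "sausage", "ham", "salami", "pepperoni", "bison", "rabbit", "quail",
--                      "goose", "partridge", "pheasant", "kangaroo", "elk", "buffalo", "boar", "horse"]
--
--     fish_keywords = ["salmon", "tuna", "cod", "trout", "mackerel", "bass", "catfish", "halibut",
--                      "tilapia", "snapper", "sardine", "anchovy", "haddock", "sole", "flounder", "swordfish",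
--                      "shrimp", "lobster", "crab", "clam", "mussel", "oyster", "scallop", "squid"]
--
--     animal_product_keywords = ["egg", "milk", "butter", "cheese", "yogurt", "cream", "honey", "gelatin", "ghee"]
--
--     veg_check = ["vegan", "vegetarian"]
--
--     for product in products:
--         product_lower = product.lower()
--
--         # Check for explicit non-vegetarian ingredients
--         if any(keyword in product_lower for keyword in meat_keywords):
--             if not (any(keyword1 in product_lower for keyword1 in veg_check)):
--                 return "Omnivore"
--         elif any(keyword in product_lower for keyword in fish_keywords):
--             if not (any(keyword1 in product_lower for keyword1 in veg_check)):
--                 return "Omnivore"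
--
--     # If no non-vegetarian ingredients found, check for vegetarian/vegan status
--     for product in products:
--         product_lower = product.lower()
--         if any(keyword in product_lower for keyword in animal_product_keywords):
--             return "Vegetarian"
--
--     return "Vegan"
-- ===== SOURCE B (Python) =====
-- MEAT_FISH = ("beef pork chicken lamb veal venison duck turkey bacon sausage ham salami "
--              "pepperoni bison rabbit quail goose partridge pheasant kangaroo elk buffalo "
--              "boar horse salmon tuna cod trout mackerel bass catfish halibut tilapia "
--              "snapper sardine anchovy haddock sole flounder swordfish shrimp lobster crab "
--              "clam mussel oyster scallop squid").split()
-- ANIMAL = "egg milk butter cheese yogurt cream honey gelatin ghee".split()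
-- VEG = "vegan vegetarian".split()
-- LABELS = ("Vegan", "Vegetarian", "Omnivore")
--
--
-- def _score(product):
--     p = product.lower()
--     if any(k in p for k in MEAT_FISH) and not any(v in p for v in VEG):
--         return 2
--     if any(k in p for k in ANIMAL):
--         return 1
--     return 0
--
--
-- def classify_diet(products):
--     return LABELS[max(map(_score, products), default=0)]
-- ===== Notes on version B (the rewrite author's own statement) =====
-- stated objective: alternative
-- what changed: Replaces A's two staged early-return loops by a per-product severity score (2 = meat/fish without veg marker, 1 = animal product, 0 = neither), a single max-reduce over the scores, and indexing a label table with the maximum.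
import Mathlib
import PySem

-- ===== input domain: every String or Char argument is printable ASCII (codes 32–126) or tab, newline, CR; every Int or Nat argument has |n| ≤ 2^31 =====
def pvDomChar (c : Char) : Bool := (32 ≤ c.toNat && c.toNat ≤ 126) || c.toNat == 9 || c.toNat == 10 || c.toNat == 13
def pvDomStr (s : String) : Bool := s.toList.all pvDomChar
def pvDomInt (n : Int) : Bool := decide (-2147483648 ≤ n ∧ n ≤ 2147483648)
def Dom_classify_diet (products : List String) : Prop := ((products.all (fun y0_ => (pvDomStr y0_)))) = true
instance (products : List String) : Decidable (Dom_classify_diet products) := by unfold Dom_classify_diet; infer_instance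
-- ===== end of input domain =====

set_option maxRecDepth 16384

-- B replaces A's two staged loops by a per-product score (2 = omnivore trigger, 1 = animal
-- product, 0 = neither) and a single max-reduce indexing a label table; objective: alternative.


-- ===== PORT A =====
-- A: two passes — first look for a meat/fish keyword not excused by a veg marker
-- (return "Omnivore"), then scan again for animal products ("Vegetarian"), else "Vegan".
def pvMeat : List String := ["beef", "pork", "chicken", "lamb", "veal", "venison", "duck", "turkey",
  "bacon", "sausage", "ham", "salami", "pepperoni", "bison", "rabbit", "quail",
  "goose", "partridge", "pheasant", "kangaroo", "elk", "buffalo", "boar", "horse"]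

def pvFish : List String := ["salmon", "tuna", "cod", "trout", "mackerel", "bass", "catfish", "halibut",
  "tilapia", "snapper", "sardine", "anchovy", "haddock", "sole", "flounder", "swordfish",
  "shrimp", "lobster", "crab", "clam", "mussel", "oyster", "scallop", "squid"]

def pvAnimal : List String := ["egg", "milk", "butter", "cheese", "yogurt", "cream", "honey", "gelatin", "ghee"]

def pvVeg : List String := ["vegan", "vegetarian"]

-- first loop of A: some "Omnivore" on early return, none if it falls through
def pvLoop1 : List String → Option String
  | [] => none
  | p :: ps =>
    let l := PySem.Str.lower p
    if pvMeat.any (fun k => PySem.Str.isIn k l) then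
      if !(pvVeg.any (fun k => PySem.Str.isIn k l)) then some "Omnivore" else pvLoop1 ps
    else if pvFish.any (fun k => PySem.Str.isIn k l) then
      if !(pvVeg.any (fun k => PySem.Str.isIn k l)) then some "Omnivore" else pvLoop1 ps
    else pvLoop1 ps

-- second loop of A
def pvLoop2 : List String → String
  | [] => "Vegan"
  | p :: ps =>
    if pvAnimal.any (fun k => PySem.Str.isIn k (PySem.Str.lower p)) then "Vegetarian"
    else pvLoop2 ps

def classify_diet (products : List String) : String :=
  match pvLoop1 products with
  | some s => s
  | none => pvLoop2 products

-- ===== PORT B =====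
-- B: keyword tables from one split string; per-product severity score; max-reduce + label table.
def pvMeatFishB : List String := PySem.Str.split₀
  ("beef pork chicken lamb veal venison duck turkey bacon sausage ham salami " ++
   "pepperoni bison rabbit quail goose partridge pheasant kangaroo elk buffalo " ++
   "boar horse salmon tuna cod trout mackerel bass catfish halibut tilapia " ++
   "snapper sardine anchovy haddock sole flounder swordfish shrimp lobster crab " ++
   "clam mussel oyster scallop squid")

def pvAnimalB : List String := PySem.Str.split₀ "egg milk butter cheese yogurt cream honey gelatin ghee"

def pvVegB : List String := PySem.Str.split₀ "vegan vegetarian"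

def pvLabels : List String := ["Vegan", "Vegetarian", "Omnivore"]

-- p = product.lower() inlined at its uses
def pvScore (product : String) : Nat :=
  if pvMeatFishB.any (fun k => PySem.Str.isIn k (PySem.Str.lower product))
      && !(pvVegB.any (fun v => PySem.Str.isIn v (PySem.Str.lower product))) then 2
  else if pvAnimalB.any (fun k => PySem.Str.isIn k (PySem.Str.lower product)) then 1
  else 0

def classify_diet_alt (products : List String) : String :=
  pvLabels.getD ((products.map pvScore).foldl Nat.max 0) ""

-- ===== PRECONDITION & SPEC =====
def Spec_classify_diet (products : List String) (out : String) : Prop := out = classify_diet_alt products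
instance (products : List String) (out : String) : Decidable (Spec_classify_diet products out) := by unfold Spec_classify_diet; infer_instance

-- ===== CLAIM =====
def Claim_equal_classify_diet : Prop := ∀ (products : List String), Dom_classify_diet products → Spec_classify_diet products (classify_diet products)

-- ===== LEMMAS AND PROOFS =====

theorem pvMeatFishB_eq : pvMeatFishB = pvMeat ++ pvFish := by decide
theorem pvAnimalB_eq : pvAnimalB = pvAnimal := by decide
theorem pvVegB_eq : pvVegB = pvVeg := by decide

-- running max of scores, as B's fold computes it
theorem foldl_max_cons (l : List Nat) (a : Nat) :
    l.foldl Nat.max a = Nat.max a (l.foldl Nat.max 0) := by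
  induction l generalizing a with
  | nil => simp
  | cons x t ih =>
    simp only [List.foldl_cons]
    rw [ih (Nat.max a x), ih (Nat.max 0 x)]
    simp [Nat.max_assoc]

-- A's second loop is "any product contains an animal-product keyword"
theorem pvLoop2_eq (ps : List String) :
    pvLoop2 ps =
      (if ps.any (fun p => pvAnimal.any (fun k => PySem.Str.isIn k (PySem.Str.lower p)))
       then "Vegetarian" else "Vegan") := by
  induction ps with
  | nil => simp [pvLoop2]
  | cons p ps ih =>
    simp only [pvLoop2, List.any_cons, ih]
    by_cases hp : (pvAnimal.any fun k => PySem.Str.isIn k (PySem.Str.lower p)) = true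
    · simp only [hp, Bool.true_or, reduceIte]
    · simp only [Bool.not_eq_true] at hp
      simp only [hp, Bool.false_or, Bool.false_eq_true, if_false]

-- A's first loop is "some product scores 2"
theorem pvLoop1_eq (ps : List String) :
    pvLoop1 ps = (if ps.any (fun p => pvScore p == 2) then some "Omnivore" else none) := by
  induction ps with
  | nil => simp [pvLoop1]
  | cons p ps ih =>
    simp only [pvLoop1, List.any_cons, ih, pvScore, pvMeatFishB_eq, pvVegB_eq, pvAnimalB_eq,
      List.any_append]
    cases hm : pvMeat.any (fun k => PySem.Str.isIn k (PySem.Str.lower p)) <;>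
    cases hf : pvFish.any (fun k => PySem.Str.isIn k (PySem.Str.lower p)) <;>
    cases hv : pvVeg.any (fun k => PySem.Str.isIn k (PySem.Str.lower p)) <;>
    cases ha : pvAnimal.any (fun k => PySem.Str.isIn k (PySem.Str.lower p)) <;>
      simp

-- scores without a 2: scoring 1 is exactly the animal-product test
theorem pvScore_one_iff (p : String) (h : ¬ pvScore p = 2) :
    (pvScore p == 1) = pvAnimalB.any (fun k => PySem.Str.isIn k (PySem.Str.lower p)) := by
  unfold pvScore at *
  split_ifs at * with h1 h2 <;> simp_all

theorem pvScore_le (p : String) : pvScore p ≤ 2 := by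
  unfold pvScore; split_ifs <;> omega

-- closed form of B's running max
theorem pvMax_eq (ps : List String) :
    (ps.map pvScore).foldl Nat.max 0 =
      (if ps.any (fun p => pvScore p == 2) then 2
       else if ps.any (fun p => pvScore p == 1) then 1 else 0) := by
  induction ps with
  | nil => simp
  | cons p ps ih =>
    simp only [List.map_cons, List.foldl_cons, List.any_cons]
    rw [foldl_max_cons, ih]
    have h3 : pvScore p = 0 ∨ pvScore p = 1 ∨ pvScore p = 2 := by
      have := pvScore_le p; omega
    rcases h3 with h | h | h <;>
      simp only [h] <;>
      by_cases ha2 : (ps.any fun q => pvScore q == 2) = true <;>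
      by_cases ha1 : (ps.any fun q => pvScore q == 1) = true <;>
      simp [ha2, ha1]

-- in the absence of a 2-scoring product, A's animal test agrees with "scores 1"
theorem any_animal_eq (ps : List String)
    (h : ps.any (fun p => pvScore p == 2) = false) :
    ps.any (fun p => pvAnimal.any (fun k => PySem.Str.isIn k (PySem.Str.lower p)))
      = ps.any (fun p => pvScore p == 1) := by
  induction ps with
  | nil => rfl
  | cons p ps ih =>
    simp only [List.any_cons, Bool.or_eq_false_iff] at h ⊢
    rw [ih h.2, ← pvAnimalB_eq, pvScore_one_iff p (by simpa using h.1)]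

-- ===== VERDICT =====
theorem classify_diet_spec : Claim_equal_classify_diet := by
  intro products _
  unfold Spec_classify_diet classify_diet classify_diet_alt
  rw [pvLoop1_eq, pvLoop2_eq, pvMax_eq]
  by_cases h2 : products.any (fun p => pvScore p == 2) = true
  · simp [h2, pvLabels]
  · simp only [Bool.not_eq_true] at h2
    rw [any_animal_eq products h2]
    simp only [h2, Bool.false_eq_true, if_false]
    by_cases h1 : products.any (fun p => pvScore p == 1) = true <;> simp [h1, pvLabels]
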